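-- pv_equiv track=rewrite | github.com/ItemsLabs/clubz-admin | divisions/simulation.py | partition_indices
-- ===== SOURCE A (Python) =====
-- def partition_indices(size, num_partitions):
--     if num_partitions <= 0 or size <= 0:
--         raise ValueError("Length and number of partitions must be positive integers")
--
--     partitions = []
--     partition_size = size // num_partitions
--     remainder = size % num_partitions
--
--     start = 0
--     for i in range(num_partitions):
--         end = start + partition_size - 1
--         if remainder > 0:
--             end += 1
--             remainder -= 1
--         partitions.append((start, end))
--         start = end + 1
--
--     return partitions
-- ===== SOURCE B (Python) =====
-- def partition_indices(size, num_partitions):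
--     if num_partitions <= 0 or size <= 0:
--         raise ValueError("Length and number of partitions must be positive integers")
--     base, r = divmod(size, num_partitions)
--     return [(i * base + min(i, r),
--              i * base + min(i, r) + base + (1 if i < r else 0) - 1)
--             for i in range(num_partitions)]
-- ===== Notes on version B (the rewrite author's own statement) =====
-- stated objective: alternative
-- what changed: Each (start, end) pair is computed independently in closed form (start = i*base + min(i, r)) instead of threading a running start and a mutating remainder through the loop.
import Mathlib
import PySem

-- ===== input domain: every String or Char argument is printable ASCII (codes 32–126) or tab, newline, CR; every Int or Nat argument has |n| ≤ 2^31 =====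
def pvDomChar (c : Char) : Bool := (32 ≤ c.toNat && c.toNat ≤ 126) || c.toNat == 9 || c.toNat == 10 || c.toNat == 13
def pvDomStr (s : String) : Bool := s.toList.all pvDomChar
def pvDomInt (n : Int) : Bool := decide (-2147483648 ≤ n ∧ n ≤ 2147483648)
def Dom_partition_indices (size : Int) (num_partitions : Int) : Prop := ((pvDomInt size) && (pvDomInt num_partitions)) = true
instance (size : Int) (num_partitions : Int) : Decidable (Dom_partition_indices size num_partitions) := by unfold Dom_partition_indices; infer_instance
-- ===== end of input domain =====

-- B replaces A's running-start/mutating-remainder loop by an independent closed form per index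
-- (start = i*base + min i r); same results everywhere A returns (Pre_ excludes exactly A's ValueError).

-- ===== PORT A =====
-- A's for-loop over range(num_partitions): the loop index is unused, so the loop state is
-- (remaining iterations, remainder, start); list is built in order, as append does.
def pvALoop (base : Int) : Nat → Int → Int → List (Int × Int)
  | 0, _, _ => []
  | m + 1, rem, start =>
      let e := start + base - 1
      if rem > 0 then
        (start, e + 1) :: pvALoop base m (rem - 1) (e + 2)
      else
        (start, e) :: pvALoop base m rem (e + 1)

def partition_indices (size : Int) (num_partitions : Int) : List (Int × Int) :=
  if num_partitions ≤ 0 ∨ size ≤ 0 then []  -- A raises ValueError here; excluded by Pre_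
  else
    pvALoop (PySem.Int.floordiv size num_partitions) num_partitions.toNat
      (PySem.Int.mod size num_partitions) 0

-- ===== PORT B =====
def pvBElem (base r i : Int) : Int × Int :=
  let start := i * base + min i r
  (start, start + base + (if i < r then 1 else 0) - 1)

def partition_indices_alt (size : Int) (num_partitions : Int) : List (Int × Int) :=
  if num_partitions ≤ 0 ∨ size ≤ 0 then []  -- B raises ValueError here; excluded by Pre_
  else
    (PySem.List.pyRange 0 num_partitions 1).map
      (pvBElem (PySem.Int.floordiv size num_partitions) (PySem.Int.mod size num_partitions))

-- ===== PRECONDITION & SPEC =====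
-- Pre_ excludes exactly the inputs where A (and B) raise ValueError.
def Pre_partition_indices (size : Int) (num_partitions : Int) : Prop :=
  0 < size ∧ 0 < num_partitions
instance (size : Int) (num_partitions : Int) : Decidable (Pre_partition_indices size num_partitions) := by
  unfold Pre_partition_indices; infer_instance

def pvWitness_partition_indices : Int × Int := (10, 3)

def Spec_partition_indices (size : Int) (num_partitions : Int) (out : List (Int × Int)) : Prop := out = partition_indices_alt size num_partitions
instance (size : Int) (num_partitions : Int) (out : List (Int × Int)) : Decidable (Spec_partition_indices size num_partitions out) := by unfold Spec_partition_indices; infer_instance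

-- ===== CLAIM (what is proved, stated in full; the proofs are below) =====
def Claim_equal_partition_indices : Prop := ∀ (size : Int) (num_partitions : Int), Dom_partition_indices size num_partitions → Pre_partition_indices size num_partitions → Spec_partition_indices size num_partitions (partition_indices size num_partitions)

-- ===== LEMMAS AND PROOFS =====

lemma pvALoop_eq (base r : Int) :
    ∀ (m : Nat) (i : Int), 0 ≤ i →
      pvALoop base m (r - min i r) (i * base + min i r)
        = (PySem.List.pyRange i (i + (m : Int)) 1).map (pvBElem base r) := by
  intro m
  induction m with
  | zero =>
      intro i hi
      simp [PySem.List.pyRange_one_eq_nil, pvALoop]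
  | succ m ih =>
      intro i hi
      push_cast
      rw [PySem.List.pyRange_one_cons (by omega : i < i + ((m : Int) + 1))]
      rw [show i + ((m : Int) + 1) = (i + 1) + (m : Int) by ring]
      by_cases h : i < r
      · have hmin : min i r = i := min_eq_left (le_of_lt h)
        have hmin' : min (i + 1) r = i + 1 := min_eq_left (by omega)
        have := ih (i + 1) (by omega)
        rw [hmin', show r - (i + 1) = r - i - 1 by ring,
            show (i + 1) * base + (i + 1) = (i * base + i + base - 1) + 2 by ring] at this
        simp only [pvALoop, hmin, List.map_cons]
        rw [if_pos (by omega : r - i > 0)]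
        refine congrArg₂ _ ?_ ?_
        · simp [pvBElem, hmin, if_pos h]
        · exact this
      · have hmin : min i r = r := min_eq_right (by omega)
        have hmin' : min (i + 1) r = r := min_eq_right (by omega)
        have := ih (i + 1) (by omega)
        rw [hmin', sub_self,
            show (i + 1) * base + r = (i * base + r + base - 1) + 1 by ring] at this
        simp only [pvALoop, hmin, List.map_cons]
        rw [sub_self, if_neg (by omega : ¬ (0:Int) > 0)]
        refine congrArg₂ _ ?_ ?_
        · simp [pvBElem, hmin, if_neg h]
        · exact this

-- ===== VERDICT (by name: the statement is the Claim_ definition above) =====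
theorem partition_indices_spec : Claim_equal_partition_indices := by
  intro size np _ hpre
  obtain ⟨hs, hn⟩ := hpre
  unfold Spec_partition_indices partition_indices partition_indices_alt
  rw [if_neg (by omega), if_neg (by omega)]
  have hr : 0 ≤ PySem.Int.mod size np := by
    rw [PySem.Int.mod_eq_emod_of_pos hn]
    exact Int.emod_nonneg size (by omega)
  have := pvALoop_eq (PySem.Int.floordiv size np) (PySem.Int.mod size np) np.toNat 0 le_rfl
  simpa [min_eq_left hr, Int.toNat_of_nonneg (le_of_lt hn)] using this
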